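-- pv_equiv track=rewrite | github.com/DoubleJONY/KDJ-algorithm-challenge | heoh/leetcode-2207.py | count_subsequence
-- ===== SOURCE A (Python) =====
-- def count_subsequence(text: str, pattern: str) -> int:
--     prefix = pattern[0]
--     suffix = pattern[1]
--
--     pattern_set = set(pattern)
--     s = ''.join(filter(lambda c: c in pattern_set, text))
--     n = len(s)
--
--     suffix_counts = [0] * n
--     n_suffix = 0
--     for i in reversed(range(n)):
--         if s[i] == suffix:
--             n_suffix += 1
--         suffix_counts[i] = n_suffix
--
--     count = 0
--     for i in range(n-1):
--         if s[i] == prefix: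
--             count += suffix_counts[i+1]
--
--     return count
-- ===== SOURCE B (Python) =====
-- def count_subsequence(text: str, pattern: str) -> int:
--     prefix = pattern[0]
--     suffix = pattern[1]
--     seen = 0
--     total = 0
--     for c in text:
--         if c == suffix:
--             total += seen
--         if c == prefix:
--             seen += 1
--     return total
-- ===== Notes on version B (the rewrite author's own statement) =====
-- stated objective: faster
-- what changed: Replaced A's filter-then-build-suffix-count-array-then-second-scan (three passes, O(n) extra memory) by a single forward pass keeping a running count of prefix occurrences and adding it at each suffix, O(1) extra memory.
import Mathlib
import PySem

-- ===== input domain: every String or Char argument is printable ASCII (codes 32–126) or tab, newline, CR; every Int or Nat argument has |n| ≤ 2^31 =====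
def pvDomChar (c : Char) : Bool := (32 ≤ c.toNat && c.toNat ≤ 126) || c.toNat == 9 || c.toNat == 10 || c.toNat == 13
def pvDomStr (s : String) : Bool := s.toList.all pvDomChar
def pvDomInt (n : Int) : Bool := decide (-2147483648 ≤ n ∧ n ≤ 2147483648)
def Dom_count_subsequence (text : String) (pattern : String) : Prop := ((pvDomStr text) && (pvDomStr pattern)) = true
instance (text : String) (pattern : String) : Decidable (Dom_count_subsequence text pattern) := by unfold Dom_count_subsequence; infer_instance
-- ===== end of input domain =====

-- B replaces A's three passes (filter, right-to-left suffix-count array, second scan) by one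
-- forward pass with a running prefix counter and O(1) extra memory.

-- ===== PORT A =====
-- reversed(range(n)) loop: right-to-left scan producing suffix_counts and the final n_suffix
def csA_suffixRec (suffix : Char) : List Char → List Int × Int
  | [] => ([], 0)
  | c :: rest =>
      let (tl, m) := csA_suffixRec suffix rest
      let m' := if c = suffix then m + 1 else m
      (m' :: tl, m')

-- for i in range(n-1): if s[i] == prefix: count += suffix_counts[i+1]
def csA_countLoop (prefixC : Char) : List Char → List Int → Int
  | c :: cs, _ :: k' :: ks => (if c = prefixC then k' else 0) + csA_countLoop prefixC cs (k' :: ks)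
  | _, _ => 0

def count_subsequence (text : String) (pattern : String) : Int :=
  match PySem.Str.pyGet? pattern 0, PySem.Str.pyGet? pattern 1 with
  | some prefixC, some suffixC =>
      let patternSet : PySem.Set Char := PySem.Set.ofList pattern.toList
      let s : List Char := text.toList.filter (fun c => PySem.Set.contains patternSet c)
      csA_countLoop prefixC s (csA_suffixRec suffixC s).1
  | _, _ => 0  -- unreachable under Pre_ (Python raises IndexError)

-- ===== PORT B =====
def count_subsequence_alt (text : String) (pattern : String) : Int :=
  match PySem.Str.pyGet? pattern 0 with
  | none => 0  -- unreachable under Pre_ (Python raises IndexError)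
  | some prefixC =>
    match PySem.Str.pyGet? pattern 1 with
    | none => 0  -- unreachable under Pre_ (Python raises IndexError)
    | some suffixC =>
        (text.toList.foldl (fun (st : Int × Int) c =>
          let total := if c = suffixC then st.2 + st.1 else st.2
          let seen := if c = prefixC then st.1 + 1 else st.1
          (seen, total)) (0, 0)).2

-- ===== PRECONDITION & SPEC =====
-- Pre_ excludes patterns of length < 2, on which both A and B raise IndexError at pattern[0]/pattern[1].
def Pre_count_subsequence (text : String) (pattern : String) : Prop := 2 ≤ pattern.toList.length
instance (text : String) (pattern : String) : Decidable (Pre_count_subsequence text pattern) := by unfold Pre_count_subsequence; infer_instance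
def pvWitness_count_subsequence : String × String := ("abcbabc", "ab")

def Spec_count_subsequence (text : String) (pattern : String) (out : Int) : Prop := out = count_subsequence_alt text pattern
instance (text : String) (pattern : String) (out : Int) : Decidable (Spec_count_subsequence text pattern out) := by unfold Spec_count_subsequence; infer_instance

-- ===== CLAIM (what is proved, stated in full; the proofs are below) =====
def Claim_equal_count_subsequence : Prop := ∀ (text : String) (pattern : String), Dom_count_subsequence text pattern → Pre_count_subsequence text pattern → Spec_count_subsequence text pattern (count_subsequence text pattern)

-- ===== LEMMAS AND PROOFS =====

-- number of pairs i < j with l[i] = pre, l[j] = suf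
def csPairs (pre suf : Char) : List Char → Int
  | [] => 0
  | c :: cs => (if c = pre then (cs.count suf : Int) else 0) + csPairs pre suf cs

theorem csA_suffixRec_snd (suf : Char) (l : List Char) :
    (csA_suffixRec suf l).2 = (l.count suf : Int) := by
  induction l with
  | nil => simp [csA_suffixRec]
  | cons c cs ih =>
      simp only [csA_suffixRec, List.count_cons]
      by_cases h : c = suf <;> simp [h, ih] <;> push_cast <;> ring

theorem csA_suffixRec_fst (suf : Char) (c : Char) (cs : List Char) :
    (csA_suffixRec suf (c :: cs)).1 =
      (csA_suffixRec suf (c :: cs)).2 :: (csA_suffixRec suf cs).1 := by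
  simp [csA_suffixRec]

theorem csA_eq_pairs (pre suf : Char) (l : List Char) :
    csA_countLoop pre l (csA_suffixRec suf l).1 = csPairs pre suf l := by
  induction l with
  | nil => simp [csA_countLoop, csPairs]
  | cons c cs ih =>
      rw [csA_suffixRec_fst]
      cases cs with
      | nil => simp [csA_suffixRec, csA_countLoop, csPairs]
      | cons d ds =>
          rw [csA_suffixRec_fst, csA_countLoop, ← csA_suffixRec_fst, ih,
              csA_suffixRec_snd]
          simp [csPairs]

theorem csB_fold (pre suf : Char) (l : List Char) (seen total : Int) :
    (l.foldl (fun (st : Int × Int) c =>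
        let t := if c = suf then st.2 + st.1 else st.2
        let s := if c = pre then st.1 + 1 else st.1
        (s, t)) (seen, total)).2
      = total + csPairs pre suf l + seen * (l.count suf : Int) := by
  induction l generalizing seen total with
  | nil => simp [csPairs]
  | cons c cs ih =>
      simp only [List.foldl_cons, ih, csPairs, List.count_cons]
      by_cases hs : c = suf <;> by_cases hp : c = pre
      · subst hs; subst hp; simp; push_cast; ring
      · subst hs
        simp [fun h : c = pre => hp h]
        try (push_cast; ring)
      · subst hp
        simp [hs]
        try (push_cast; ring)
      · simp [hs, hp]
        try (push_cast; ring)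

theorem count_filter_eq (suf : Char) (p : Char → Bool) (hs : p suf = true) (l : List Char) :
    (l.filter p).count suf = l.count suf := by
  induction l with
  | nil => rfl
  | cons c cs ih =>
      by_cases h : c = suf
      · subst h; simp [List.filter_cons, hs, ih]
      · by_cases hp : p c = true <;>
          simp [hp, h, ih]

theorem csPairs_filter_eq (pre suf : Char) (p : Char → Bool)
    (hp : p pre = true) (hs : p suf = true) (l : List Char) :
    csPairs pre suf (l.filter p) = csPairs pre suf l := by
  induction l with
  | nil => rfl
  | cons c cs ih =>
      by_cases hc : p c = true
      · simp only [List.filter_cons, hc, if_pos, ih, csPairs,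
          count_filter_eq suf p hs]
      · have hcp : c ≠ pre := fun h => hc (h ▸ hp)
        simp [hc, csPairs, hcp, ih]

-- ===== VERDICT (by name: the statement is the Claim_ definition above) =====
theorem count_subsequence_spec : Claim_equal_count_subsequence := by
  intro text pattern _hdom hpre
  unfold Spec_count_subsequence count_subsequence count_subsequence_alt
  have h0 : PySem.Str.pyGet? pattern 0 = pattern.toList[(0 : Nat)]? := by
    simpa using PySem.Str.pyGet?_natCast pattern 0
  have h1 : PySem.Str.pyGet? pattern 1 = pattern.toList[(1 : Nat)]? := by
    simpa using PySem.Str.pyGet?_natCast pattern 1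
  unfold Pre_count_subsequence at hpre
  obtain ⟨pre, hpre0⟩ : ∃ x, pattern.toList[(0 : Nat)]? = some x :=
    ⟨_, List.getElem?_eq_getElem (by omega)⟩
  obtain ⟨suf, hsuf1⟩ : ∃ x, pattern.toList[(1 : Nat)]? = some x :=
    ⟨_, List.getElem?_eq_getElem (by omega)⟩
  rw [h0, h1, hpre0, hsuf1]
  have hmem0 : pre ∈ pattern.toList := List.mem_of_getElem? hpre0
  have hmem1 : suf ∈ pattern.toList := List.mem_of_getElem? hsuf1
  have hp : PySem.Set.contains (PySem.Set.ofList pattern.toList) pre = true := by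
    rw [PySem.Set.contains_iff, PySem.Set.mem_ofList]; exact hmem0
  have hs : PySem.Set.contains (PySem.Set.ofList pattern.toList) suf = true := by
    rw [PySem.Set.contains_iff, PySem.Set.mem_ofList]; exact hmem1
  simp only [csA_eq_pairs, csB_fold, zero_mul, add_zero, zero_add]
  exact csPairs_filter_eq pre suf _ hp hs text.toList
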